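-- pv_equiv track=rewrite | github.com/zaxtax/hist | hist.py | hist_strip
-- ===== SOURCE A (Python) =====
-- def hist_strip(h):
--     "Remove leading and trailing 0s in histogram"
--     l = len(h[0])
--     i = 0
--     while h[0][i] == 0 and i < l:
--         i += 1
--
--     j = l
--     while h[0][j-1] == 0 and j >= i:
--         j -= 1
--
--     return (h[0][i:j], h[1][i:j])
-- ===== SOURCE B (Python) =====
-- def hist_strip(h):
--     "Remove leading and trailing 0s in histogram"
--     nz = [k for k, v in enumerate(h[0]) if v != 0]
--     i, j = nz[0], nz[-1] + 1
--     return (h[0][i:j], h[1][i:j])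
-- ===== Notes on version B (the rewrite author's own statement) =====
-- stated objective: simpler
-- what changed: Replaces the two inward end-scans (while loops moving i up and j down) with a single forward pass that collects the indices of non-zero counts and takes its first and last element as the slice bounds.
import Mathlib
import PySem

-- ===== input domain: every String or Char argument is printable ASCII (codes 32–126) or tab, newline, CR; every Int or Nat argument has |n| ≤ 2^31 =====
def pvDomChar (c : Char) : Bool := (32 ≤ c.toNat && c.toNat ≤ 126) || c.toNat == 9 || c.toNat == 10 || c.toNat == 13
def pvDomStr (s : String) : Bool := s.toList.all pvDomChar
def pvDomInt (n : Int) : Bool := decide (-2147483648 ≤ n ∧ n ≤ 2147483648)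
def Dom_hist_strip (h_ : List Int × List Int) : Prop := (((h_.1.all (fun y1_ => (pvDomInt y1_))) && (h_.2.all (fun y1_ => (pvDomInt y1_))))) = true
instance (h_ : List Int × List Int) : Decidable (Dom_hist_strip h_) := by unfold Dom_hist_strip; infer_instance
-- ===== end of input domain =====

-- B replaces A's two inward end-scans with one forward pass collecting the non-zero indices
-- and slicing between its first and last element (objective: simpler).


-- ===== PORT A =====
-- first while loop: advance i while h[0][i] == 0 and i < l (index first, as in Python)
def histStripFirst (h0 : List Int) (i : Nat) : Nat :=
  match PySem.List.pyGet? h0 (i : Int) with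
  | some v => if h : v = 0 ∧ i < h0.length then histStripFirst h0 (i + 1) else i
  | none => i          -- IndexError path (unreachable under Pre_)
termination_by h0.length - i
decreasing_by omega

-- second while loop: decrease j while h[0][j-1] == 0 and j >= i; fuel covers the
-- (Pre_-excluded) run into negative indices that ends in Python's IndexError
def histStripLast (h0 : List Int) (i : Int) (j : Int) (fuel : Nat) : Int :=
  match fuel with
  | 0 => j             -- IndexError path (unreachable under Pre_)
  | fuel + 1 =>
    match PySem.List.pyGet? h0 (j - 1) with
    | some v => if v = 0 ∧ j ≥ i then histStripLast h0 i (j - 1) fuel else j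
    | none => j        -- IndexError path (unreachable under Pre_)

def hist_strip (h_ : List Int × List Int) : List Int × List Int :=
  let l := h_.1.length
  let i := histStripFirst h_.1 0
  let j := histStripLast h_.1 (i : Int) (l : Int) (2 * l + 2)
  (PySem.List.slice h_.1 (some (i : Int)) (some j),
   PySem.List.slice h_.2 (some (i : Int)) (some j))

-- ===== PORT B =====
def hist_strip_alt (h_ : List Int × List Int) : List Int × List Int :=
  let nz := ((PySem.List.enumerate h_.1 0).filter (fun p => p.2 ≠ 0)).map (·.1)
  match PySem.List.pyGet? nz 0, PySem.List.pyGet? nz (-1) with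
  | some i, some k =>
      (PySem.List.slice h_.1 (some i) (some (k + 1)),
       PySem.List.slice h_.2 (some i) (some (k + 1)))
  | _, _ => ([], [])   -- nz[0] raises IndexError (unreachable under Pre_)

-- ===== PRECONDITION & SPEC =====
-- Pre_ excludes exactly the inputs where h[0] is empty or all-zero: there A raises IndexError.
def Pre_hist_strip (h_ : List Int × List Int) : Prop := (h_.1.any (· ≠ 0)) = true
instance (h_ : List Int × List Int) : Decidable (Pre_hist_strip h_) := by unfold Pre_hist_strip; infer_instance
def pvWitness_hist_strip : (List Int × List Int) := ([0, 3, 0], [1, 2, 3])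

def Spec_hist_strip (h_ : List Int × List Int) (out : List Int × List Int) : Prop := out = hist_strip_alt h_
instance (h_ : List Int × List Int) (out : List Int × List Int) : Decidable (Spec_hist_strip h_ out) := by unfold Spec_hist_strip; infer_instance

-- ===== CLAIM (what is proved, stated in full; the proofs are below) =====
def Claim_equal_hist_strip : Prop := ∀ (h_ : List Int × List Int), Dom_hist_strip h_ → Pre_hist_strip h_ → Spec_hist_strip h_ (hist_strip h_)

-- ===== LEMMAS AND PROOFS =====\n
-- index of the first non-zero entry
def firstNZ : List Int → Option Nat
  | [] => none
  | x :: xs => if x ≠ 0 then some 0 else (firstNZ xs).map (· + 1)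

-- index of the last non-zero entry
def lastNZ : List Int → Option Nat
  | [] => none
  | x :: xs =>
    match lastNZ xs with
    | some k => some (k + 1)
    | none => if x ≠ 0 then some 0 else none

-- the non-zero index list built by B
def nzOf (s : Int) (h0 : List Int) : List Int :=
  ((PySem.List.enumerate h0 s).filter (fun p => p.2 ≠ 0)).map (·.1)

theorem firstNZ_lt (h0 : List Int) (f : Nat) (h : firstNZ h0 = some f) : f < h0.length := by
  induction h0 generalizing f with
  | nil => simp [firstNZ] at h
  | cons x xs ih =>
    by_cases hx : x = 0 <;> simp [firstNZ, hx] at h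
    · obtain ⟨k, hk, rfl⟩ := h
      have := ih k hk; simp; omega
    · simp [← h]

theorem firstNZ_nz (h0 : List Int) (f : Nat) (h : firstNZ h0 = some f) : h0[f]? ≠ some 0 := by
  induction h0 generalizing f with
  | nil => simp [firstNZ] at h
  | cons x xs ih =>
    by_cases hx : x = 0 <;> simp [firstNZ, hx] at h
    · obtain ⟨k, hk, rfl⟩ := h
      simpa using ih k hk
    · simp [← h, hx]

theorem lastNZ_lt (h0 : List Int) (g : Nat) (h : lastNZ h0 = some g) : g < h0.length := by
  induction h0 generalizing g with
  | nil => simp [lastNZ] at h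
  | cons x xs ih =>
    unfold lastNZ at h
    cases hxs : lastNZ xs with
    | some k => rw [hxs] at h; simp at h; have := ih k hxs; simp; omega
    | none =>
      rw [hxs] at h
      by_cases hx : x = 0 <;> simp [hx] at h
      simp [← h]

theorem lastNZ_nz (h0 : List Int) (g : Nat) (h : lastNZ h0 = some g) : h0[g]? ≠ some 0 := by
  induction h0 generalizing g with
  | nil => simp [lastNZ] at h
  | cons x xs ih =>
    unfold lastNZ at h
    cases hxs : lastNZ xs with
    | some k => rw [hxs] at h; simp at h; subst h; simpa using ih k hxs
    | none =>
      rw [hxs] at h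
      by_cases hx : x = 0 <;> simp [hx] at h
      simp [← h, hx]

theorem lastNZ_none_all_zero (h0 : List Int) (h : lastNZ h0 = none) :
    ∀ m, m < h0.length → h0[m]? = some 0 := by
  induction h0 with
  | nil => simp
  | cons y ys ihy =>
    unfold lastNZ at h
    cases hys : lastNZ ys with
    | some k => rw [hys] at h; simp at h
    | none =>
      rw [hys] at h
      by_cases hy : y = 0 <;> simp [hy] at h ⊢
      intro m hm
      cases m with
      | zero => simp [hy]
      | succ m => simpa using ihy hys m (by simpa using hm)

theorem lastNZ_after (h0 : List Int) (g : Nat) (h : lastNZ h0 = some g) :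
    ∀ m, g < m → m < h0.length → h0[m]? = some 0 := by
  induction h0 generalizing g with
  | nil => simp [lastNZ] at h
  | cons x xs ih =>
    unfold lastNZ at h
    intro m hgm hm
    cases hxs : lastNZ xs with
    | some k =>
      rw [hxs] at h; simp at h; subst h
      obtain ⟨m', rfl⟩ : ∃ m', m = m' + 1 := ⟨m - 1, by omega⟩
      simpa using ih k hxs m' (by omega) (by simpa using hm)
    | none =>
      rw [hxs] at h
      by_cases hx : x = 0 <;> simp [hx] at h
      subst h
      obtain ⟨m', rfl⟩ : ∃ m', m = m' + 1 := ⟨m - 1, by omega⟩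
      simpa using lastNZ_none_all_zero xs hxs m' (by simpa using hm)

theorem firstNZ_total (h0 : List Int) (h : h0.any (· ≠ 0) = true) : ∃ f, firstNZ h0 = some f := by
  induction h0 with
  | nil => simp at h
  | cons x xs ih =>
    by_cases hx : x = 0
    · simp [hx] at h
      obtain ⟨f, hf⟩ := ih (by simpa using h)
      exact ⟨f + 1, by simp [firstNZ, hx, hf]⟩
    · exact ⟨0, by simp [firstNZ, hx]⟩

theorem lastNZ_total (h0 : List Int) (h : h0.any (· ≠ 0) = true) : ∃ g, lastNZ h0 = some g := by
  induction h0 with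
  | nil => simp at h
  | cons x xs ih =>
    by_cases hxs : xs.any (· ≠ 0) = true
    · obtain ⟨g, hg⟩ := ih hxs
      exact ⟨g + 1, by unfold lastNZ; rw [hg]⟩
    · have hx : x ≠ 0 := by
        simp at h hxs
        rcases h with h | h
        · exact h
        · obtain ⟨y, hy, hy0⟩ := h; exact absurd (hxs y hy) hy0
      cases hlz : lastNZ xs with
      | some k => exact ⟨k + 1, by unfold lastNZ; rw [hlz]⟩
      | none => exact ⟨0, by unfold lastNZ; rw [hlz]; simp [hx]⟩

-- A's first loop computes the first non-zero index
theorem first_eq (h0 : List Int) :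
    ∀ n i k, h0.length - i ≤ n → firstNZ (h0.drop i) = some k → histStripFirst h0 i = i + k := by
  intro n
  induction n with
  | zero =>
    intro i k hn hk
    have : h0.drop i = [] := List.drop_eq_nil_of_le (by omega)
    rw [this] at hk; simp [firstNZ] at hk
  | succ n ih =>
    intro i k hn hk
    by_cases hi : i < h0.length
    · have hdrop : h0.drop i = h0[i] :: h0.drop (i + 1) := List.drop_eq_getElem_cons hi
      rw [hdrop] at hk
      by_cases hx : h0[i] = 0
      · simp [firstNZ, hx] at hk
        obtain ⟨k', hk', rfl⟩ := hk
        rw [histStripFirst]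
        rw [PySem.List.pyGet?_ofNat h0 i hi]
        simp only [hx, hi, and_true, dite_eq_ite, if_true]
        have := ih (i + 1) k' (by omega) hk'
        omega
      · simp [firstNZ, hx] at hk
        rw [histStripFirst]
        rw [PySem.List.pyGet?_ofNat h0 i hi]
        simp [hx, ← hk]
    · have : h0.drop i = [] := List.drop_eq_nil_of_le (by omega)
      rw [this] at hk; simp [firstNZ] at hk

-- A's second loop stops just past the last non-zero index
theorem last_eq (h0 : List Int) (i : Int) (g : Nat) (hg : lastNZ h0 = some g) (hig : i ≤ (g : Int)) :
    ∀ fuel (j : Int), (g : Int) < j → j ≤ h0.length → (j - g - 1).toNat ≤ fuel →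
      histStripLast h0 i j fuel = (g : Int) + 1 := by
  have hglt := lastNZ_lt h0 g hg
  intro fuel
  induction fuel with
  | zero => intro j h1 h2 h3; have : j = (g : Int) + 1 := by omega
            simpa [histStripLast] using this
  | succ fuel ih =>
    intro j h1 h2 h3
    rw [histStripLast, PySem.List.pyGet?_of_nonneg h0 (show (0:Int) ≤ j - 1 by omega)]
    by_cases hje : j = (g : Int) + 1
    · have hnz := lastNZ_nz h0 g hg
      have hidx : (j - 1).toNat = g := by omega
      rw [hidx, List.getElem?_eq_getElem hglt]
      have hne : h0[g]'hglt ≠ 0 := fun hc => hnz (by rw [List.getElem?_eq_getElem hglt, hc])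
      simp [hje]
      intro hc
      exact absurd hc hne
    · have hgm : g < (j - 1).toNat := by omega
      have hz := lastNZ_after h0 g hg (j - 1).toNat hgm (by omega)
      rw [hz]
      have hge : j ≥ i := by omega
      simp only [hge, and_true, if_true]
      exact ih (j - 1) (by omega) (by omega) (by omega)

-- B's nz list: first element
theorem nz_head (h0 : List Int) : ∀ s : Int,
    PySem.List.pyGet? (nzOf s h0) 0 = (firstNZ h0).map (fun k => s + (k : Int)) := by
  induction h0 with
  | nil => intro s; simp [nzOf, firstNZ, PySem.List.enumerate_nil, PySem.List.pyGet?]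
  | cons x xs ih =>
    intro s
    by_cases hx : x = 0
    · have : nzOf s (x :: xs) = nzOf (s + 1) xs := by
        simp [nzOf, PySem.List.enumerate_cons, hx]
      rw [this, ih (s + 1)]
      simp [firstNZ, hx]
      cases firstNZ xs <;> simp
      omega
    · have : nzOf s (x :: xs) = s :: nzOf (s + 1) xs := by
        simp [nzOf, PySem.List.enumerate_cons, hx]
      rw [this]
      simp [firstNZ, hx]

-- when there is no non-zero entry the nz list is empty
theorem nz_empty (h0 : List Int) (h : lastNZ h0 = none) : ∀ s : Int, nzOf s h0 = [] := by
  induction h0 with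
  | nil => intro s; simp [nzOf, PySem.List.enumerate_nil]
  | cons x xs ih =>
    intro s
    unfold lastNZ at h
    cases hxs : lastNZ xs with
    | some k => rw [hxs] at h; simp at h
    | none =>
      rw [hxs] at h
      by_cases hx : x = 0 <;> simp [hx] at h
      have := ih hxs (s + 1)
      simp [nzOf, PySem.List.enumerate_cons, hx] at this ⊢
      exact this

-- B's nz list: last element
theorem nz_last (h0 : List Int) : ∀ s : Int,
    (nzOf s h0).getLast? = (lastNZ h0).map (fun k => s + (k : Int)) := by
  induction h0 with
  | nil => intro s; simp [nzOf, lastNZ, PySem.List.enumerate_nil]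
  | cons x xs ih =>
    intro s
    unfold lastNZ
    cases hxs : lastNZ xs with
    | some k =>
      have htl := ih (s + 1)
      rw [hxs] at htl
      have hne : nzOf (s + 1) xs ≠ [] := by
        intro hc; rw [hc] at htl; simp at htl
      by_cases hx : x = 0
      · have : nzOf s (x :: xs) = nzOf (s + 1) xs := by
          simp [nzOf, PySem.List.enumerate_cons, hx]
        rw [this, htl]; simp; omega
      · have : nzOf s (x :: xs) = s :: nzOf (s + 1) xs := by
          simp [nzOf, PySem.List.enumerate_cons, hx]
        rw [this, List.getLast?_cons, htl]
        simp; omega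
    | none =>
      have hemp := nz_empty xs hxs (s + 1)
      by_cases hx : x = 0
      · have : nzOf s (x :: xs) = nzOf (s + 1) xs := by
          simp [nzOf, PySem.List.enumerate_cons, hx]
        rw [this, hemp]; simp [hx]
      · have : nzOf s (x :: xs) = s :: nzOf (s + 1) xs := by
          simp [nzOf, PySem.List.enumerate_cons, hx]
        rw [this, hemp]; simp [hx]
-- ===== VERDICT (by name: the statement is the Claim_ definition above) =====
theorem hist_strip_spec : Claim_equal_hist_strip := by
  intro h_ hdom hpre
  obtain ⟨h0, h1⟩ := h_
  unfold Spec_hist_strip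
  have hany : h0.any (· ≠ 0) = true := hpre
  obtain ⟨f, hf⟩ := firstNZ_total h0 hany
  obtain ⟨g, hg⟩ := lastNZ_total h0 hany
  have hflt := firstNZ_lt h0 f hf
  have hglt := lastNZ_lt h0 g hg
  have hfg : f ≤ g := by
    by_contra hc
    have hz := lastNZ_after h0 g hg f (by omega) hflt
    exact firstNZ_nz h0 f hf hz
  have hfirst : histStripFirst h0 0 = f := by
    have := first_eq h0 h0.length 0 f (by omega) (by simpa using hf)
    simpa using this
  have hlast : histStripLast h0 (f : Int) (h0.length : Int) (2 * h0.length + 2) = (g : Int) + 1 := by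
    exact last_eq h0 (f : Int) g hg (by exact_mod_cast hfg) _ _ (by exact_mod_cast hglt)
      (by omega) (by omega)
  have hhead : PySem.List.pyGet? (nzOf 0 h0) 0 = some ((f : Int)) := by
    rw [nz_head h0 0, hf]; simp
  have htail : PySem.List.pyGet? (nzOf 0 h0) (-1) = some ((g : Int)) := by
    rw [PySem.List.pyGet?_neg_one, nz_last h0 0, hg]; simp
  show hist_strip (h0, h1) = hist_strip_alt (h0, h1)
  unfold hist_strip hist_strip_alt
  simp only [hfirst, hlast]
  have hnz : ((PySem.List.enumerate (h0, h1).1 0).filter (fun p => p.2 ≠ 0)).map (·.1) = nzOf 0 h0 := rfl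
  simp only [hnz, hhead, htail]
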